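-- pv_equiv track=rewrite | github.com/lkzfox/lotofacil | v2/libs/helper.py | analisarLista
-- ===== SOURCE A (Python) =====
-- def analisarLista(lista):
-- 	seguidos = True
-- 	todos_seguidos = []
-- 	qtd_seguidos = 0
--
-- 	for n in range(len(lista)):
-- 		ainda = lista[n] != 0
-- 		if ainda:
-- 			qtd_seguidos += 1
-- 			seguidos = True
-- 		else:
-- 			if qtd_seguidos > 0:
-- 				todos_seguidos.append(qtd_seguidos)
-- 			seguidos = False
-- 			qtd_seguidos = 0
--
-- 	if qtd_seguidos > 0:
-- 		todos_seguidos.append(qtd_seguidos)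
--
-- 	return {
-- 		'max': max(todos_seguidos),
-- 		'min': min(todos_seguidos)
-- 	}
-- ===== SOURCE B (Python) =====
-- def analisarLista(lista):
--     runs = []
--     i = 0
--     n = len(lista)
--     while i < n:
--         if lista[i] != 0:
--             j = i
--             while j < n and lista[j] != 0:
--                 j += 1
--             runs.append(j - i)
--             i = j
--         else:
--             i += 1
--     return {
--         'max': max(runs),
--         'min': min(runs)
--     }
-- ===== Notes on version B (the rewrite author's own statement) =====
-- stated objective: alternative
-- what changed: Replaces A's flag-and-counter state machine (seguidos/qtd_seguidos with a trailing flush) by a two-pointer span scan that jumps over each maximal nonzero run and records its length as an index difference; max/min still raise on empty/all-zero input, which Pre_ excludes.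
-- outside the precondition, e.g. on analisarLista([0, 0]): A raises ValueError, B raises ValueError
import Mathlib
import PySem

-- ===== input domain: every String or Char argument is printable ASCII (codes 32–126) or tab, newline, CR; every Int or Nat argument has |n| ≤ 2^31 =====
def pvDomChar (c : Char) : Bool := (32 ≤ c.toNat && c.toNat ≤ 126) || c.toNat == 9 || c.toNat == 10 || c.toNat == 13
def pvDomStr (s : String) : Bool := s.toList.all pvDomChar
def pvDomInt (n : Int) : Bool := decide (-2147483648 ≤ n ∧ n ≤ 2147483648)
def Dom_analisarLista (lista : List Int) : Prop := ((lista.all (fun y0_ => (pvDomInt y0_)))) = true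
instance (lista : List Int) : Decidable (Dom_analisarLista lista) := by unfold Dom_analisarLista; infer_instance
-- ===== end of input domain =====

-- B replaces A's flag-and-counter state machine by a two-pointer span scan over maximal
-- nonzero runs (objective: alternative decomposition, same O(n) cost).

-- ===== PORT A =====
-- one loop step of A: state = (seguidos, todos_seguidos, qtd_seguidos)
def pvStepA (st : Bool × List Int × Int) (v : Int) : Bool × List Int × Int :=
  let (_, todos, qtd) := st
  if v ≠ 0 then (true, todos, qtd + 1)
  else (false, (if qtd > 0 then todos ++ [qtd] else todos), 0)

def analisarLista (lista : List Int) : List (String × Int) :=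
  let st := (PySem.List.pyRange 0 (PySem.List.len lista) 1).foldl
      (fun acc n => pvStepA acc (PySem.List.pyGetD lista n 0)) (true, ([] : List Int), (0 : Int))
  let todos := if st.2.2 > 0 then st.2.1 ++ [st.2.2] else st.2.1
  match PySem.List.max? todos (fun x => x), PySem.List.min? todos (fun x => x) with
  | some mx, some mn => [("max", mx), ("min", mn)]
  | _, _ => []  -- Python raises ValueError (max of empty) here; excluded by Pre_

-- ===== PORT B =====
-- the outer while loop of Source B: skip zeros one at a time; at a nonzero element
-- the inner while advances j over the whole run, recording its length
def pvRunsB : List Int → List Int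
  | [] => []
  | x :: xs =>
    if x ≠ 0 then
      (1 + ((xs.takeWhile (fun y => decide (y ≠ 0))).length : Int))
        :: pvRunsB (xs.dropWhile (fun y => decide (y ≠ 0)))
    else pvRunsB xs
termination_by l => l.length
decreasing_by
  · simpa using Nat.lt_succ_of_le (List.length_dropWhile_le _ _)
  · simp

def analisarLista_alt (lista : List Int) : List (String × Int) :=
  let runs := pvRunsB lista
  match PySem.List.max? runs (fun x => x) with
  | some mx =>
    match PySem.List.min? runs (fun x => x) with
    | some mn => [("max", mx), ("min", mn)]
    | none => []  -- Python raises ValueError here; excluded by Pre_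
  | none => []  -- Python raises ValueError here; excluded by Pre_

-- ===== PRECONDITION & SPEC =====
-- Pre_ excludes exactly the inputs on which Python A raises: with no nonzero element
-- (empty or all-zero list) max()/min() get an empty list and raise ValueError.
def Pre_analisarLista (lista : List Int) : Prop := (lista.any (fun x => decide (x ≠ 0))) = true
instance (lista : List Int) : Decidable (Pre_analisarLista lista) := by unfold Pre_analisarLista; infer_instance
def pvWitness_analisarLista : List Int := [1, 0, 2, 3]

def Spec_analisarLista (lista : List Int) (out : List (String × Int)) : Prop := out = analisarLista_alt lista
instance (lista : List Int) (out : List (String × Int)) : Decidable (Spec_analisarLista lista out) := by unfold Spec_analisarLista; infer_instance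

-- ===== CLAIM (what is proved, stated in full; the proofs are below) =====
def Claim_equal_analisarLista : Prop := ∀ (lista : List Int), Dom_analisarLista lista → Pre_analisarLista lista → Spec_analisarLista lista (analisarLista lista)

-- ===== LEMMAS AND PROOFS =====

-- reference description of the run-length list, parameterised by the pending run length
def pvRunsFrom (qtd : Int) : List Int → List Int
  | [] => if qtd > 0 then [qtd] else []
  | x :: xs =>
    if x ≠ 0 then pvRunsFrom (qtd + 1) xs
    else (if qtd > 0 then [qtd] else []) ++ pvRunsFrom 0 xs

-- A's loop + final flush computes todos ++ pvRunsFrom qtd l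
theorem pvFoldA_eq (l : List Int) : ∀ (seg : Bool) (todos : List Int) (qtd : Int),
    (let st := l.foldl pvStepA (seg, todos, qtd)
     if st.2.2 > 0 then st.2.1 ++ [st.2.2] else st.2.1) = todos ++ pvRunsFrom qtd l := by
  induction l with
  | nil =>
    intro seg todos qtd
    simp only [List.foldl_nil, pvRunsFrom]
    split <;> simp
  | cons x xs ih =>
    intro seg todos qtd
    simp only [List.foldl_cons, pvStepA, pvRunsFrom]
    by_cases hx : x ≠ 0
    · rw [if_pos hx, if_pos hx]
      exact ih true todos (qtd + 1)
    · rw [if_neg hx, if_neg hx, ih]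
      by_cases hq : qtd > 0 <;> simp [hq]

-- a pending positive run plus the leading nonzero span form the next recorded run
theorem pvRunsFrom_pos (l : List Int) : ∀ (qtd : Int), 0 < qtd →
    pvRunsFrom qtd l
      = (qtd + ((l.takeWhile (fun y => decide (y ≠ 0))).length : Int))
          :: pvRunsFrom 0 (l.dropWhile (fun y => decide (y ≠ 0))) := by
  induction l with
  | nil => intro qtd h; simp [pvRunsFrom, h]
  | cons x xs ih =>
    intro qtd h
    by_cases hx : x ≠ 0
    · simp only [pvRunsFrom, if_true, List.takeWhile_cons, List.dropWhile_cons, decide_eq_true hx]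
      rw [ih (qtd + 1) (by omega)]
      simp [hx]; ring_nf
    · have hx0 : x = 0 := by omega
      subst hx0
      simp [pvRunsFrom, h]

-- B's span scan equals the reference description with no pending run
theorem pvRunsB_eq_aux : ∀ (n : Nat) (l : List Int), l.length ≤ n → pvRunsB l = pvRunsFrom 0 l := by
  intro n
  induction n with
  | zero =>
    intro l hl
    have : l = [] := List.eq_nil_of_length_eq_zero (Nat.le_zero.mp hl)
    subst this; simp [pvRunsB, pvRunsFrom]
  | succ n ih =>
    intro l hl
    cases l with
    | nil => simp [pvRunsB, pvRunsFrom]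
    | cons x xs =>
      by_cases hx : x ≠ 0
      · rw [pvRunsB, if_pos hx,
            ih _ (le_trans (List.length_dropWhile_le _ _) (by simpa using hl)),
            show pvRunsFrom 0 (x :: xs) = pvRunsFrom 1 xs from by simp [pvRunsFrom, hx],
            pvRunsFrom_pos xs 1 (by omega)]
      · have hx0 : x = 0 := by omega
        subst hx0
        rw [pvRunsB, if_neg (by simp), ih xs (by simpa using hl)]
        simp [pvRunsFrom]

theorem pvRunsB_eq (l : List Int) : pvRunsB l = pvRunsFrom 0 l :=
  pvRunsB_eq_aux l.length l le_rfl

-- ===== VERDICT (by name: the statement is the Claim_ definition above) =====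
theorem analisarLista_spec : Claim_equal_analisarLista := by
  intro lista _ _
  unfold Spec_analisarLista analisarLista analisarLista_alt
  dsimp only
  rw [PySem.List.len_eq,
      PySem.List.foldl_pyRange_zero_pyGetD' lista 0 pvStepA (true, ([] : List Int), (0 : Int))]
  rw [pvRunsB_eq]
  have h : (if ((lista.foldl pvStepA (true, ([] : List Int), (0 : Int))).2.2) > 0
            then (lista.foldl pvStepA (true, ([] : List Int), (0 : Int))).2.1
                   ++ [(lista.foldl pvStepA (true, ([] : List Int), (0 : Int))).2.2]
            else (lista.foldl pvStepA (true, ([] : List Int), (0 : Int))).2.1)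
           = pvRunsFrom 0 lista := by
    simpa using pvFoldA_eq lista true [] 0
  rw [h]
  cases PySem.List.max? (pvRunsFrom 0 lista) (fun x => x) <;>
    cases PySem.List.min? (pvRunsFrom 0 lista) (fun x => x) <;> rfl
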